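-- pv_equiv track=rewrite | github.com/CharryWu/leetcode | 2024/amazon/get-max-consecutive-on.py | getMaxConsecutiveON
-- ===== SOURCE A (Python) =====
-- def getMaxConsecutiveON(server_states, k):
--     # write your code here
--     # [-3,1,-1] k
--     # sliding window
--     lst = []
--     cur = 0
--     curCh = server_states[0]
--     for ch in server_states:
--         if ch == curCh:
--             cur += 1
--         else:
--             lst.append((-1 if curCh == '0' else 1) * cur)
--             curCh = ch
--             cur = 1
--     lst.append((-1 if curCh == '0' else 1) * cur)
--     left = 0
--     negative = 0
--     total_sum = 0
--     max_sum = 0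
--     for right in range(len(lst)):
--         num = lst[right]
--         if num < 0:
--             negative += 1
--         total_sum += abs(num)
--         while negative > k:
--             num_left = lst[left]
--             left += 1
--             if num_left < 0:
--                 negative -= 1
--             total_sum -= abs(num_left)
--         max_sum = max(max_sum, total_sum)
--     return max_sum
-- ===== SOURCE B (Python) =====
-- def getMaxConsecutiveON(server_states, k):
--     # One-pass sliding window over characters, counting zero-RUNS inside the
--     # window; no run-length list is built.
--     best = 0
--     window = []
--     zruns = 0
--     prev = None
--     for ch in server_states:
--         if ch == '0' and (not window or prev != '0'):
--             zruns += 1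
--         window.append(ch)
--         while zruns > k:
--             c = window.pop(0)
--             if c == '0' and (not window or window[0] != '0'):
--                 zruns -= 1
--         best = max(best, len(window))
--         prev = ch
--     return best
-- ===== Notes on version B (the rewrite author's own statement) =====
-- stated objective: alternative
-- what changed: B drops A's run-length-encoding preprocessing and run-level sliding window and instead slides a window directly over the characters, counting zero-runs inside the window (run starts/ends detected at the window edges).
import Mathlib
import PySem

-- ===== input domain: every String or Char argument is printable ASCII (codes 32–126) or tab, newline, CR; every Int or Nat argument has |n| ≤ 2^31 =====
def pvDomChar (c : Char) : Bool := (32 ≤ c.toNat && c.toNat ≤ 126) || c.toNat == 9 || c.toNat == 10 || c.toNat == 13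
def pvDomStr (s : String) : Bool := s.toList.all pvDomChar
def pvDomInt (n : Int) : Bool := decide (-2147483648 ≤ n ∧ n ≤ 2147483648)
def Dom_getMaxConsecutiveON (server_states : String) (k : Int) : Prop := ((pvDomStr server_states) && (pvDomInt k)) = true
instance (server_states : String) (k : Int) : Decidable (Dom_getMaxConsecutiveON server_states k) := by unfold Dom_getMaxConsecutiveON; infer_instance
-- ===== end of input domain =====

-- B replaces A's run-length-list preprocessing + run-level sliding window by a single
-- character-level sliding window that counts zero-RUNS inside the window (objective: alternative).

-- ===== PORT A =====
-- signed run length: (-1 if curCh == '0' else 1) * cur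
def pvSig (c : Char) (m : Int) : Int := (if c = '0' then -1 else 1) * m

-- body of A's first for-loop (state: lst, cur, curCh)
def pvAStep1 (st : List Int × Int × Char) (ch : Char) : List Int × Int × Char :=
  match st with
  | (lst, cur, curCh) =>
    if ch = curCh then (lst, cur + 1, curCh)
    else (lst ++ [pvSig curCh cur], 1, ch)

-- A's inner `while negative > k` loop; the left pointer is represented by the
-- window lst[left:right+1] itself (popping its head = `left += 1`).  When the
-- window is empty and negative > k Python raises IndexError (outside Pre_).
def pvAShrink (k : Int) : List Int → Int → Int → List Int × Int × Int
  | [], neg, tot => ([], neg, tot)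
  | w :: ws, neg, tot =>
    if neg > k then pvAShrink k ws (if w < 0 then neg - 1 else neg) (tot - |w|)
    else (w :: ws, neg, tot)

-- body of A's second for-loop (state: window = lst[left:right+1], negative, total_sum, max_sum)
def pvAStep2 (k : Int) (st : List Int × Int × Int × Int) (num : Int) : List Int × Int × Int × Int :=
  match st with
  | (win, neg, tot, best) =>
    let neg := if num < 0 then neg + 1 else neg
    let tot := tot + |num|
    let r := pvAShrink k (win ++ [num]) neg tot
    (r.1, r.2.1, r.2.2, max best r.2.2)

def getMaxConsecutiveON (server_states : String) (k : Int) : Int :=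
  match server_states.toList with
  | [] => 0   -- Python: IndexError on server_states[0]; excluded by Pre_
  | c0 :: _ =>
    let p := server_states.toList.foldl pvAStep1 ([], 0, c0)
    let lst := p.1 ++ [pvSig p.2.2 p.2.1]
    (lst.foldl (pvAStep2 k) ([], 0, 0, 0)).2.2.2

-- ===== PORT B =====
-- B's inner `while zruns > k` loop: pop window[0]; zruns -= 1 iff the popped char
-- is '0' and its run is now completely outside the window.
def pvBShrink (k : Int) : List Char → Int → List Char × Int
  | [], z => ([], z)
  | c :: rest, z =>
    if z > k then
      pvBShrink k rest (if c = '0' ∧ (rest = [] ∨ rest.head? ≠ some '0') then z - 1 else z)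
    else (c :: rest, z)

-- body of B's for-loop (state: window, zruns, best, prev)
def pvBStep (k : Int) (st : List Char × Int × Int × Option Char) (ch : Char) : List Char × Int × Int × Option Char :=
  match st with
  | (win, z, best, prev) =>
    let z := if ch = '0' ∧ (win = [] ∨ prev ≠ some '0') then z + 1 else z
    let r := pvBShrink k (win ++ [ch]) z
    (r.1, r.2, max best ((r.1.length : Int)), some ch)

def getMaxConsecutiveON_alt (server_states : String) (k : Int) : Int :=
  (server_states.toList.foldl (pvBStep k) ([], 0, 0, none)).2.2.1

-- ===== PRECONDITION & SPEC =====
-- A raises IndexError on the empty string (server_states[0]) and, for k < 0, the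
-- shrink loop drains the whole window and then raises IndexError; both are excluded.
def Pre_getMaxConsecutiveON (server_states : String) (k : Int) : Prop :=
  server_states.toList ≠ [] ∧ 0 ≤ k
instance (server_states : String) (k : Int) : Decidable (Pre_getMaxConsecutiveON server_states k) := by
  unfold Pre_getMaxConsecutiveON; infer_instance

def pvWitness_getMaxConsecutiveON : String × Int := ("10010", 1)

def Spec_getMaxConsecutiveON (server_states : String) (k : Int) (out : Int) : Prop := out = getMaxConsecutiveON_alt server_states k
instance (server_states : String) (k : Int) (out : Int) : Decidable (Spec_getMaxConsecutiveON server_states k out) := by unfold Spec_getMaxConsecutiveON; infer_instance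

-- ===== CLAIM (what is proved, stated in full; the proofs are below) =====
def Claim_equal_getMaxConsecutiveON : Prop := ∀ (server_states : String) (k : Int), Dom_getMaxConsecutiveON server_states k → Pre_getMaxConsecutiveON server_states k → Spec_getMaxConsecutiveON server_states k (getMaxConsecutiveON server_states k)


-- ===== LEMMAS AND PROOFS =====

-- run-length decomposition of a character list
def pvRuns : List Char → List (Char × Nat)
  | [] => []
  | c :: cs =>
    match pvRuns cs with
    | [] => [(c, 1)]
    | (d, n) :: rs => if c = d then (c, n + 1) :: rs else (c, 1) :: (d, n) :: rs

def pvFlat (rs : List (Char × Nat)) : List Char := rs.flatMap (fun p => List.replicate p.2 p.1)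

def pvSigs (rs : List (Char × Nat)) : List Int := rs.map (fun p => pvSig p.1 (p.2 : Int))

-- number of zero runs
def pvZC : List (Char × Nat) → Int
  | [] => 0
  | p :: rs => (if p.1 = '0' then 1 else 0) + pvZC rs

-- total character length
def pvLenF : List (Char × Nat) → Int
  | [] => 0
  | p :: rs => (p.2 : Int) + pvLenF rs

def pvSumAbs : List Int → Int
  | [] => 0
  | x :: xs => |x| + pvSumAbs xs

def pvHeadNe (c : Char) : List (Char × Nat) → Prop
  | [] => True
  | p :: _ => c ≠ p.1

def pvValid : List (Char × Nat) → Prop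
  | [] => True
  | (c, n) :: rs => 1 ≤ n ∧ pvHeadNe c rs ∧ pvValid rs

def pvLast (ws : List (Char × Nat)) : Option Char := ws.getLast?.map (·.1)

-- ---- facts about the run decomposition ----
lemma pvFlat_nil : pvFlat [] = [] := rfl

lemma pvFlat_cons (p : Char × Nat) (rs : List (Char × Nat)) :
    pvFlat (p :: rs) = List.replicate p.2 p.1 ++ pvFlat rs := by
  simp [pvFlat]

lemma pvRuns_head (c : Char) (cs : List Char) :
    ∃ n rs, pvRuns (c :: cs) = (c, n) :: rs ∧ 1 ≤ n := by
  cases h : pvRuns cs with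
  | nil => exact ⟨1, [], by simp [pvRuns, h], le_refl 1⟩
  | cons p rs =>
    obtain ⟨d, n⟩ := p
    by_cases hc : c = d
    · exact ⟨n + 1, rs, by simp [pvRuns, h, hc], by omega⟩
    · exact ⟨1, (d, n) :: rs, by simp [pvRuns, h, hc], le_refl 1⟩

lemma pvFlat_runs (cs : List Char) : pvFlat (pvRuns cs) = cs := by
  induction cs with
  | nil => rfl
  | cons c cs ih =>
    cases h : pvRuns cs with
    | nil =>
      rw [h, pvFlat_nil] at ih
      simp only [pvRuns, h]
      rw [← ih]
      simp [pvFlat_cons, pvFlat_nil]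
    | cons p rs =>
      obtain ⟨d, n⟩ := p
      rw [h] at ih
      by_cases hc : c = d
      · subst hc
        simp only [pvRuns, h, if_pos rfl]
        simp [pvFlat_cons, List.replicate_succ] at ih ⊢
        exact ih
      · simp only [pvRuns, h, if_neg hc]
        simp [pvFlat_cons] at ih ⊢
        exact ih

lemma pvValid_runs (cs : List Char) : pvValid (pvRuns cs) := by
  induction cs with
  | nil => trivial
  | cons c cs ih =>
    cases h : pvRuns cs with
    | nil => simp [pvRuns, h, pvValid, pvHeadNe]
    | cons p rs =>
      obtain ⟨d, n⟩ := p
      rw [h] at ih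
      obtain ⟨h1, h2, h3⟩ := ih
      by_cases hc : c = d
      · subst hc
        simp only [pvRuns, h, if_pos rfl]
        exact ⟨by omega, h2, h3⟩
      · simp only [pvRuns, h, if_neg hc]
        exact ⟨le_refl 1, hc, h1, h2, h3⟩

-- ---- phase 1 of A = pvSigs of the run decomposition ----
lemma pvP1_run (n : Nat) (c : Char) (lst : List Int) (m : Int) :
    List.foldl pvAStep1 (lst, m, c) (List.replicate n c) = (lst, m + n, c) := by
  induction n generalizing m with
  | zero => simp
  | succ j ih =>
    rw [List.replicate_succ, List.foldl_cons]
    simp only [pvAStep1, eq_self_iff_true, if_true]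
    rw [ih, show m + 1 + (j : Int) = m + ((j + 1 : Nat) : Int) by push_cast; ring]

lemma pvP1_main (rs : List (Char × Nat)) (h : pvValid rs) :
    ∀ lst (m : Int) c, pvHeadNe c rs →
      (let f := List.foldl pvAStep1 (lst, m, c) (pvFlat rs)
       f.1 ++ [pvSig f.2.2 f.2.1]) = lst ++ [pvSig c m] ++ pvSigs rs := by
  induction rs with
  | nil => simp [pvFlat_nil, pvSigs]
  | cons p rs ih =>
    obtain ⟨d, n⟩ := p
    obtain ⟨h1, h2, h3⟩ := h
    intro lst m c hne
    obtain ⟨j, rfl⟩ : ∃ j, n = j + 1 := ⟨n - 1, by omega⟩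
    rw [pvFlat_cons, List.foldl_append, List.replicate_succ, List.foldl_cons]
    have hdc : ¬ (d = c) := fun hh => hne hh.symm
    simp only [pvAStep1, if_neg hdc]
    rw [pvP1_run]
    have := ih h3 (lst ++ [pvSig c m]) (1 + (j : Int)) d h2
    simp only [this]
    simp [pvSigs, pvSig]
    split_ifs <;> ring

-- ---- shrink lemmas ----
lemma pvAShrink_noop (k : Int) (win : List Int) (neg tot : Int) (h : neg ≤ k) :
    pvAShrink k win neg tot = (win, neg, tot) := by
  cases win with
  | nil => rfl
  | cons w ws => simp [pvAShrink, show ¬ (neg > k) by omega]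

lemma pvAShrink_skip (k : Int) (xs : List Int) (hxs : ∀ x ∈ xs, 0 ≤ x) :
    ∀ rest neg tot, k < neg →
      pvAShrink k (xs ++ rest) neg tot = pvAShrink k rest neg (tot - pvSumAbs xs) := by
  induction xs with
  | nil => intro rest neg tot _; simp [pvSumAbs]
  | cons x xs ih =>
    intro rest neg tot hk
    have hx : 0 ≤ x := hxs x (by simp)
    rw [List.cons_append]
    simp only [pvAShrink, if_pos (show neg > k by omega), if_neg (show ¬ (x < 0) by omega)]
    rw [ih (fun y hy => hxs y (by simp [hy])) rest neg _ hk]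
    congr 1
    simp [pvSumAbs]
    omega

lemma pvAShrink_zrun (k m : Int) (rest : List Int) (tot : Int) (hm : 0 < m) :
    pvAShrink k ((-m) :: rest) (k + 1) tot = (rest, k, tot - m) := by
  simp only [pvAShrink, if_pos (show k + 1 > k by omega), if_pos (show -m < 0 by omega)]
  rw [show k + 1 - 1 = k by ring, abs_neg, abs_of_nonneg (by omega : (0:Int) ≤ m)]
  exact pvAShrink_noop k rest k (tot - m) (le_refl k)

lemma pvBShrink_noop (k : Int) (win : List Char) (z : Int) (h : z ≤ k) :
    pvBShrink k win z = (win, z) := by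
  cases win with
  | nil => rfl
  | cons w ws => simp [pvBShrink, show ¬ (z > k) by omega]

lemma pvBShrink_skip (k : Int) (xs : List Char) (hxs : ∀ c ∈ xs, c ≠ '0') :
    ∀ rest z, k < z → pvBShrink k (xs ++ rest) z = pvBShrink k rest z := by
  induction xs with
  | nil => intro rest z _; simp
  | cons x xs ih =>
    intro rest z hz
    have hx : x ≠ '0' := hxs x (by simp)
    rw [List.cons_append]
    simp only [pvBShrink, if_pos (show z > k by omega)]
    rw [if_neg (by simp [hx])]
    exact ih (fun y hy => hxs y (by simp [hy])) rest z hz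

lemma pvBShrink_zrun (k : Int) (m : Nat) (hm : 1 ≤ m) (rest : List Char)
    (hrest : rest = [] ∨ rest.head? ≠ some '0') :
    pvBShrink k (List.replicate m '0' ++ rest) (k + 1) = (rest, k) := by
  induction m with
  | zero => omega
  | succ j ih =>
    rw [List.replicate_succ, List.cons_append]
    simp only [pvBShrink, if_pos (show k + 1 > k by omega)]
    cases j with
    | zero =>
      rw [if_pos (by simpa using hrest)]
      simp only [List.replicate_zero, List.nil_append, show k + 1 - 1 = k by ring]
      exact pvBShrink_noop k rest k (le_refl k)
    | succ i =>
      rw [if_neg (by simp [List.replicate_succ])]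
      exact ih (by omega)

-- ---- B growth lemmas ----
lemma pvMaxAbsorb (a b c : Int) (h : b ≤ c) : max (max a b) c = max a c := by
  rcases le_total a b with h1 | h1 <;> rcases le_total a c with h2 | h2 <;>
    simp [max_def] <;> omega

lemma pvBGrow (k : Int) (c : Char) (n : Nat) (hn : 1 ≤ n) :
    ∀ win (z best : Int) prev, z ≤ k →
      (c ≠ '0' ∨ (win ≠ [] ∧ prev = some '0')) →
      List.foldl (pvBStep k) (win, z, best, prev) (List.replicate n c)
        = (win ++ List.replicate n c, z, max best ((win.length : Int) + n), some c) := by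
  induction n with
  | zero => omega
  | succ j ih =>
    intro win z best prev hz h
    have hcond : ¬ (c = '0' ∧ (win = [] ∨ prev ≠ some '0')) := by
      rcases h with h | ⟨h1, h2⟩
      · exact fun hc => h hc.1
      · rintro ⟨hc, h3 | h3⟩
        · exact h1 h3
        · exact h3 h2
    rw [List.replicate_succ, List.foldl_cons]
    simp only [pvBStep]
    rw [if_neg hcond, pvBShrink_noop k (win ++ [c]) z hz]
    cases j with
    | zero =>
      simp [List.length_append]
    | succ i =>
      rw [ih (by omega) (win ++ [c]) z _ (some c) hz
        (by by_cases hc : c = '0'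
            · exact Or.inr ⟨by simp, by rw [hc]⟩
            · exact Or.inl hc)]
      dsimp only
      rw [pvMaxAbsorb _ _ _ (by omega)]
      have hl : (win ++ [c]) ++ List.replicate (i + 1) c = win ++ List.replicate (i + 1 + 1) c := by
        rw [List.append_assoc]
        simp [List.singleton_append, ← List.replicate_succ]
      have hm : (((win ++ [c]).length : Nat) : Int) + ((i + 1 : Nat) : Int)
          = ((win.length : Nat) : Int) + ((i + 1 + 1 : Nat) : Int) := by
        simp [List.length_append]
        omega
      rw [hl, hm]
      simp [List.replicate_succ]

lemma pvBGrowZero (k : Int) (n : Nat) (hn : 1 ≤ n) (win : List Char) (z best : Int)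
    (prev : Option Char) (hz : z + 1 ≤ k) (hfirst : win = [] ∨ prev ≠ some '0') :
    List.foldl (pvBStep k) (win, z, best, prev) (List.replicate n '0')
      = (win ++ List.replicate n '0', z + 1, max best ((win.length : Int) + n), some '0') := by
  obtain ⟨j, rfl⟩ : ∃ j, n = j + 1 := ⟨n - 1, by omega⟩
  rw [List.replicate_succ, List.foldl_cons]
  simp only [pvBStep]
  rw [if_pos ⟨trivial, hfirst⟩, pvBShrink_noop k (win ++ ['0']) (z + 1) hz]
  cases j with
  | zero =>
    simp [List.length_append]
  | succ i =>
    rw [pvBGrow k '0' (i + 1) (by omega) (win ++ ['0']) (z + 1) _ (some '0') hz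
      (by refine Or.inr ⟨?_, ?_⟩ <;> simp)]
    dsimp only
    rw [pvMaxAbsorb _ _ _ (by omega)]
    have hl : (win ++ ['0']) ++ List.replicate (i + 1) '0' = win ++ List.replicate (i + 1 + 1) '0' := by
      rw [List.append_assoc]
      simp [List.singleton_append, ← List.replicate_succ]
    have hm : (((win ++ ['0']).length : Nat) : Int) + ((i + 1 : Nat) : Int)
        = ((win.length : Nat) : Int) + ((i + 1 + 1 : Nat) : Int) := by
      simp [List.length_append]
      omega
    rw [hl, hm]
    simp [List.replicate_succ]

lemma pvBDrain (k : Int) (n : Nat) (hn : 1 ≤ n) :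
    ∀ (best : Int) prev, List.foldl (pvBStep k) ([], k, best, prev) (List.replicate n '0')
      = ([], k, max best 0, some '0') := by
  induction n with
  | zero => omega
  | succ j ih =>
    intro best prev
    rw [List.replicate_succ, List.foldl_cons]
    simp only [pvBStep]
    rw [if_pos (by simp), List.nil_append,
      show (['0'] : List Char) = List.replicate 1 '0' ++ [] by simp,
      pvBShrink_zrun k 1 (le_refl 1) [] (Or.inl rfl)]
    cases j with
    | zero => simp
    | succ i =>
      rw [ih (by omega) (max best _) (some '0')]
      simp [pvMaxAbsorb]

-- ---- bookkeeping lemmas ----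
lemma pvLenF_flat (ws : List (Char × Nat)) : ((pvFlat ws).length : Int) = pvLenF ws := by
  induction ws with
  | nil => rfl
  | cons p rs ih =>
    rw [pvFlat_cons]
    simp only [List.length_append, List.length_replicate, pvLenF]
    push_cast
    omega

lemma pvSumAbs_sigs (ws : List (Char × Nat)) : pvSumAbs (pvSigs ws) = pvLenF ws := by
  induction ws with
  | nil => rfl
  | cons p rs ih =>
    simp only [pvSigs, List.map_cons, pvSumAbs, pvLenF]
    rw [show pvSumAbs (List.map (fun p => pvSig p.1 (p.2 : Int)) rs) = pvLenF rs from ih]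
    congr 1
    by_cases hc : p.1 = '0' <;> simp [pvSig, hc, abs_of_nonneg]

lemma pvZC_nonneg (ws : List (Char × Nat)) : 0 ≤ pvZC ws := by
  induction ws with
  | nil => simp [pvZC]
  | cons p rs ih => simp only [pvZC]; split_ifs <;> omega

lemma pvZC_zero_no_zero (ws : List (Char × Nat)) (h : pvZC ws = 0) :
    ∀ p ∈ ws, p.1 ≠ '0' := by
  induction ws with
  | nil => simp
  | cons q rs ih =>
    have hnn := pvZC_nonneg rs
    simp only [pvZC] at h
    intro p hp
    rcases List.mem_cons.mp hp with rfl | hp'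
    · intro hq
      rw [if_pos hq] at h
      omega
    · refine ih ?_ p hp'
      split_ifs at h <;> omega


lemma pvValid_append_single (ws : List (Char × Nat)) (c : Char) (n : Nat) (hn : 1 ≤ n)
    (hv : pvValid ws) (hl : ∀ d, pvLast ws = some d → d ≠ c) :
    pvValid (ws ++ [(c, n)]) := by
  induction ws with
  | nil => exact ⟨hn, trivial, trivial⟩
  | cons q rs ih =>
    obtain ⟨a, b⟩ := q
    obtain ⟨hb, hhd, hv'⟩ := hv
    refine ⟨hb, ?_, ?_⟩
    · cases rs with
      | nil =>
        exact hl a (by simp [pvLast])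
      | cons r rs' => exact hhd
    · refine ih hv' ?_
      intro d hd
      refine hl d ?_
      cases rs with
      | nil => simp [pvLast] at hd
      | cons r rs' => simpa [pvLast, List.getLast?_cons_cons] using hd

lemma pvLast_append_single (ws : List (Char × Nat)) (p : Char × Nat) :
    pvLast (ws ++ [p]) = some p.1 := by
  simp [pvLast, List.getLast?_concat]

lemma pvLast_some_of_ne_nil (ws : List (Char × Nat)) (h : ws ≠ []) :
    ∃ d, pvLast ws = some d := by
  cases h' : ws.getLast? with
  | none => exact absurd (List.getLast?_eq_none_iff.mp h') h
  | some p => exact ⟨p.1, by simp [pvLast, h']⟩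

-- first zero run decomposition
lemma pvSplit (ws : List (Char × Nat)) (hv : pvValid ws) (hz : 1 ≤ pvZC ws) :
    ∃ p m rest, ws = p ++ ('0', m) :: rest ∧ (∀ x ∈ p, x.1 ≠ '0') ∧ 1 ≤ m ∧
      pvValid (('0', m) :: rest) ∧ pvZC ws = pvZC rest + 1 := by
  induction ws with
  | nil => simp [pvZC] at hz
  | cons q rs ih =>
    obtain ⟨a, b⟩ := q
    obtain ⟨hb, hhd, hv'⟩ := hv
    by_cases ha : a = '0'
    · subst ha
      exact ⟨[], b, rs, by simp, by simp, hb, ⟨hb, hhd, hv'⟩, by simp [pvZC]; ring⟩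
    · have hz' : 1 ≤ pvZC rs := by
        simp only [pvZC, if_neg ha] at hz
        omega
      obtain ⟨p, m, rest, he, hp, hm, hvr, hzc⟩ := ih hv' hz'
      refine ⟨(a, b) :: p, m, rest, by simp [he], ?_, hm, hvr, ?_⟩
      · rintro x hx
        rcases List.mem_cons.mp hx with rfl | hx'
        · exact ha
        · exact hp x hx'
      · simp only [pvZC, if_neg ha, hzc]
        ring

lemma pvFlat_head (rs : List (Char × Nat)) (d : Char) (j : Nat) (rs' : List (Char × Nat))
    (h : rs = (d, j) :: rs') (hv : pvValid rs) : (pvFlat rs).head? = some d := by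
  subst h
  obtain ⟨hj, -, -⟩ := hv
  obtain ⟨i, rfl⟩ : ∃ i, j = i + 1 := ⟨j - 1, by omega⟩
  simp [pvFlat_cons, List.replicate_succ]

lemma pvSig_zero (m : Int) : pvSig '0' m = -m := by simp [pvSig]

lemma pvSig_pos (c : Char) (hc : c ≠ '0') (m : Int) : pvSig c m = m := by simp [pvSig, hc]

lemma pvZC_append (l1 l2 : List (Char × Nat)) : pvZC (l1 ++ l2) = pvZC l1 + pvZC l2 := by
  induction l1 with
  | nil => simp [pvZC]
  | cons p rs ih => simp only [List.cons_append, pvZC, ih]; ring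

lemma pvLenF_append (l1 l2 : List (Char × Nat)) : pvLenF (l1 ++ l2) = pvLenF l1 + pvLenF l2 := by
  induction l1 with
  | nil => simp [pvLenF]
  | cons p rs ih => simp only [List.cons_append, pvLenF, ih]; ring

lemma pvFlat_append (l1 l2 : List (Char × Nat)) : pvFlat (l1 ++ l2) = pvFlat l1 ++ pvFlat l2 := by
  simp [pvFlat]

lemma pvSigs_append (l1 l2 : List (Char × Nat)) : pvSigs (l1 ++ l2) = pvSigs l1 ++ pvSigs l2 := by
  simp [pvSigs]

lemma pvSigs_nonneg (ws : List (Char × Nat)) (h : ∀ p ∈ ws, p.1 ≠ '0') :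
    ∀ x ∈ pvSigs ws, 0 ≤ x := by
  intro x hx
  obtain ⟨p, hp, rfl⟩ := List.mem_map.mp hx
  rw [pvSig_pos p.1 (h p hp)]
  positivity

lemma pvFlat_no_zero (ws : List (Char × Nat)) (h : ∀ p ∈ ws, p.1 ≠ '0') :
    ∀ x ∈ pvFlat ws, x ≠ '0' := by
  intro x hx
  obtain ⟨p, hp, hx'⟩ := List.mem_flatMap.mp hx
  rw [List.eq_of_mem_replicate hx']
  exact h p hp

-- ---- the main simulation ----
lemma pvMain (k : Int) (hk : 0 ≤ k) :
    ∀ rs, pvValid rs → ∀ ws prev (best : Int), pvValid ws →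
      (∀ d m rs', rs = (d, m) :: rs' → prev ≠ some d) →
      (∀ c', pvLast ws = some c' → prev = some c') →
      pvZC ws ≤ k →
      (List.foldl (pvAStep2 k) (pvSigs ws, pvZC ws, pvLenF ws, best) (pvSigs rs)).2.2.2
        = (List.foldl (pvBStep k) (pvFlat ws, pvZC ws, best, prev) (pvFlat rs)).2.2.1 := by
  intro rs
  induction rs with
  | nil => intros; rfl
  | cons q rs ih =>
    obtain ⟨c, n⟩ := q
    intro hvrs ws prev best hvw hhd hlast hzc
    obtain ⟨hn, hhd', hvrs'⟩ := hvrs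
    have hprevc : prev ≠ some c := hhd c n rs rfl
    have hhd2 : ∀ d m rs', rs = (d, m) :: rs' → (some c : Option Char) ≠ some d := by
      intro d m rs' he hcd
      rw [he] at hhd'
      exact hhd' (Option.some.inj hcd)
    have hlastne : ∀ d, pvLast ws = some d → d ≠ c := by
      intro d hd hdc
      exact hprevc (hdc ▸ hlast d hd)
    rw [show pvSigs ((c, n) :: rs) = pvSig c (n : Int) :: pvSigs rs from rfl, List.foldl_cons,
      pvFlat_cons, List.foldl_append]
    by_cases hc : c = '0'
    · subst hc
      have hfirst : pvFlat ws = [] ∨ prev ≠ some '0' := Or.inr hprevc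
      by_cases hsmall : pvZC ws + 1 ≤ k
      · -- new zero run still fits: no shrink on either side
        have hA : pvAStep2 k (pvSigs ws, pvZC ws, pvLenF ws, best) (pvSig '0' (n : Int))
            = (pvSigs (ws ++ [('0', n)]), pvZC (ws ++ [('0', n)]), pvLenF (ws ++ [('0', n)]),
               max best (pvLenF (ws ++ [('0', n)]))) := by
          simp only [pvAStep2, pvSig_zero]
          rw [if_pos (by omega : -(n : Int) < 0),
            pvAShrink_noop k _ _ _ (by omega : pvZC ws + 1 ≤ k)]
          simp [pvSigs_append, pvZC_append, pvLenF_append, pvSigs, pvZC, pvLenF, pvSig_zero,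
            abs_of_nonneg (by omega : (0:Int) ≤ (n:Int))]
        have hB : List.foldl (pvBStep k) (pvFlat ws, pvZC ws, best, prev) (List.replicate n '0')
            = (pvFlat (ws ++ [('0', n)]), pvZC (ws ++ [('0', n)]),
               max best (pvLenF (ws ++ [('0', n)])), some '0') := by
          rw [pvBGrowZero k n hn (pvFlat ws) (pvZC ws) best prev hsmall hfirst]
          rw [pvLenF_flat]
          simp [pvFlat_append, pvZC_append, pvLenF_append, pvFlat_cons, pvFlat_nil, pvZC, pvLenF]
        rw [hA, hB]
        refine ih hvrs' (ws ++ [('0', n)]) (some '0') _ ?_ hhd2 ?_ ?_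
        · exact pvValid_append_single ws '0' n hn hvw (fun d hd => hlastne d hd)
        · intro c' hc'
          rw [pvLast_append_single] at hc'
          exact hc'
        · rw [pvZC_append]
          simp [pvZC]
          omega
      · -- window already holds k zero runs: a shrink past the first zero run
        by_cases hzc0 : pvZC ws = 0
        · -- k = 0: the whole window is drained
          have hk0 : k = 0 := by omega
          have hnz := pvZC_zero_no_zero ws hzc0
          have hA : pvAStep2 k (pvSigs ws, pvZC ws, pvLenF ws, best) (pvSig '0' (n : Int))
              = (pvSigs ([] : List (Char × Nat)), pvZC ([] : List (Char × Nat)),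
                 pvLenF ([] : List (Char × Nat)), max best (pvLenF ([] : List (Char × Nat)))) := by
            simp only [pvAStep2, pvSig_zero]
            rw [if_pos (by omega : -(n : Int) < 0),
              pvAShrink_skip k (pvSigs ws) (pvSigs_nonneg ws hnz) [-(n : Int)] _ _ (by omega),
              show pvZC ws + 1 = k + 1 by omega,
              show (-(n : Int)) = -((n : Int)) from rfl,
              pvAShrink_zrun k (n : Int) [] _ (by omega : (0:Int) < (n : Int))]
            rw [pvSumAbs_sigs, abs_neg, Int.abs_natCast]
            simp only [pvSigs, pvZC, pvLenF, List.map_nil, Prod.mk.injEq]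
            exact ⟨trivial, hk0, by ring, by rw [show pvLenF ws + (n:Int) - pvLenF ws - (n:Int) = 0 by ring]⟩
          have hB : List.foldl (pvBStep k) (pvFlat ws, pvZC ws, best, prev) (List.replicate n '0')
              = (pvFlat ([] : List (Char × Nat)), pvZC ([] : List (Char × Nat)),
                 max best (pvLenF ([] : List (Char × Nat))), some '0') := by
            obtain ⟨j, rfl⟩ : ∃ j, n = j + 1 := ⟨n - 1, by omega⟩
            rw [List.replicate_succ, List.foldl_cons]
            simp only [pvBStep]
            rw [if_pos ⟨trivial, hfirst⟩,
              pvBShrink_skip k (pvFlat ws) (pvFlat_no_zero ws hnz) _ _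
                (by omega : k < pvZC ws + 1),
              show pvZC ws + 1 = k + 1 by omega,
              show (['0'] : List Char) = List.replicate 1 '0' ++ [] by simp,
              pvBShrink_zrun k 1 (le_refl 1) [] (Or.inl rfl)]
            cases j with
            | zero => simp [pvFlat, pvZC, pvLenF, hk0]
            | succ i =>
              rw [show (([] : List Char), k).1 = ([] : List Char) from rfl]
              dsimp only
              rw [pvBDrain k (i + 1) (by omega)]
              simp [pvFlat, pvZC, pvLenF, pvMaxAbsorb, hk0]
          rw [hA, hB]
          refine ih hvrs' [] (some '0') _ trivial hhd2 ?_ ?_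
          · intro c' hc'
            simp [pvLast] at hc'
          · simp [pvZC]
            omega
        · -- k ≥ 1: shrink exactly past the first zero run of the window
          have hzck : pvZC ws = k := by omega
          obtain ⟨p, m, rest, heq, hp, hm, hvzr, hzcid⟩ :=
            pvSplit ws hvw (by omega : 1 ≤ pvZC ws)
          obtain ⟨-, hhdr, hvrest⟩ := hvzr
          have hrest_ne : rest ≠ [] := by
            intro hre
            subst hre
            have : pvLast ws = some '0' := by
              rw [heq]
              exact pvLast_append_single p ('0', m)
            exact hprevc (hlast '0' this)
          cases rest with
          | nil => exact absurd rfl hrest_ne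
          | cons r rest' =>
            obtain ⟨d0, j0⟩ := r
            have hd0 : d0 ≠ '0' := Ne.symm hhdr
            obtain ⟨e, he⟩ := pvLast_some_of_ne_nil ws (by rw [heq]; simp)
            have hpe : prev = some e := hlast e he
            have hene : e ≠ '0' := fun h => hprevc (h ▸ hpe)
            have hLws : pvLast ws = pvLast ((d0, j0) :: rest') := by
              rw [heq, pvLast, List.getLast?_append_of_ne_nil _ (List.cons_ne_nil _ _),
                List.getLast?_cons_cons]
              rfl
            have hlaste : ∀ d, pvLast ((d0, j0) :: rest') = some d → d ≠ '0' := by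
              intro d hd
              rw [← hLws] at hd
              rw [he] at hd
              exact Option.some.inj hd ▸ hene
            have hzcr : pvZC ws = pvZC ((d0, j0) :: rest') + 1 := hzcid
            have hlen : pvLenF ws = pvLenF p + ((m : Int) + pvLenF ((d0, j0) :: rest')) := by
              rw [heq, pvLenF_append]
              simp [pvLenF]
            have hA : pvAStep2 k (pvSigs ws, pvZC ws, pvLenF ws, best) (pvSig '0' (n : Int))
                = (pvSigs (((d0, j0) :: rest') ++ [('0', n)]),
                   pvZC (((d0, j0) :: rest') ++ [('0', n)]),
                   pvLenF (((d0, j0) :: rest') ++ [('0', n)]),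
                   max best (pvLenF (((d0, j0) :: rest') ++ [('0', n)]))) := by
              simp only [pvAStep2, pvSig_zero]
              rw [if_pos (by omega : -(n : Int) < 0)]
              have hwl : pvSigs ws ++ [-(n : Int)]
                  = pvSigs p ++ ((-(m : Int)) :: (pvSigs ((d0, j0) :: rest') ++ [-(n : Int)])) := by
                rw [heq, pvSigs_append]
                simp [pvSigs, pvSig_zero]
              rw [hwl, pvAShrink_skip k (pvSigs p) (pvSigs_nonneg p hp) _ _ _ (by omega),
                show pvZC ws + 1 = k + 1 by omega,
                pvAShrink_zrun k (m : Int) _ _ (by omega : (0:Int) < (m : Int))]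
              rw [pvSumAbs_sigs, abs_neg, Int.abs_natCast, pvSigs_append, pvZC_append,
                pvLenF_append,
                show pvSigs [('0', n)] = [-(n : Int)] by simp [pvSigs, pvSig_zero],
                show pvZC [('0', n)] = 1 by simp [pvZC],
                show pvLenF [('0', n)] = (n : Int) by simp [pvLenF]]
              simp only [Prod.mk.injEq]
              refine ⟨trivial, by omega, by omega, ?_⟩
              congr 1
              omega
            have hB : List.foldl (pvBStep k) (pvFlat ws, pvZC ws, best, prev)
                  (List.replicate n '0')
                = (pvFlat (((d0, j0) :: rest') ++ [('0', n)]),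
                   pvZC (((d0, j0) :: rest') ++ [('0', n)]),
                   max best (pvLenF (((d0, j0) :: rest') ++ [('0', n)])), some '0') := by
              obtain ⟨j, rfl⟩ : ∃ j, n = j + 1 := ⟨n - 1, by omega⟩
              rw [List.replicate_succ, List.foldl_cons]
              simp only [pvBStep]
              rw [if_pos ⟨trivial, hfirst⟩]
              have hwl : pvFlat ws ++ ['0']
                  = pvFlat p ++ (List.replicate m '0' ++ (pvFlat ((d0, j0) :: rest') ++ ['0'])) := by
                rw [heq, pvFlat_append, pvFlat_cons]
                simp [List.append_assoc]
              have hhead : (pvFlat ((d0, j0) :: rest') ++ ['0']).head? ≠ some '0' := by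
                rw [List.head?_append, pvFlat_head ((d0, j0) :: rest') d0 j0 rest' rfl hvrest]
                simp [hd0]
              rw [hwl, pvBShrink_skip k (pvFlat p) (pvFlat_no_zero p hp) _ _ (by omega),
                show pvZC ws + 1 = k + 1 by omega,
                pvBShrink_zrun k m hm _ (Or.inr hhead)]
              dsimp only
              have hW1 : ((pvFlat ((d0, j0) :: rest') ++ ['0']).length : Int)
                  = pvLenF ((d0, j0) :: rest') + 1 := by
                rw [List.length_append]
                push_cast
                rw [pvLenF_flat]
                simp
              cases j with
              | zero =>
                simp only [List.replicate_zero, List.foldl_nil]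
                rw [hW1, pvFlat_append, pvZC_append, pvLenF_append,
                  show pvFlat [('0', 0 + 1)] = ['0'] by simp [pvFlat_cons, pvFlat_nil],
                  show pvZC [('0', 0 + 1)] = 1 by simp [pvZC],
                  show pvLenF [('0', 0 + 1)] = (1 : Int) by simp [pvLenF]]
                simp only [Prod.mk.injEq]
                exact ⟨trivial, by omega, trivial⟩
              | succ i =>
                rw [pvBGrow k '0' (i + 1) (by omega) _ k _ (some '0') (le_refl k)
                  (Or.inr ⟨by simp, rfl⟩)]
                rw [pvMaxAbsorb _ _ _ (by omega), hW1]
                rw [List.append_assoc]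
                simp only [List.singleton_append, ← List.replicate_succ]
                rw [pvFlat_append, pvZC_append, pvLenF_append,
                  show pvFlat [('0', i + 1 + 1)] = List.replicate (i + 1 + 1) '0' by
                    simp [pvFlat_cons, pvFlat_nil],
                  show pvZC [('0', i + 1 + 1)] = 1 by simp [pvZC],
                  show pvLenF [('0', i + 1 + 1)] = ((i : Int) + 2) by simp [pvLenF]; push_cast; ring]
                simp only [Prod.mk.injEq]
                refine ⟨trivial, by omega, ?_, trivial⟩
                congr 1
                push_cast
                ring
            rw [hA, hB]
            refine ih hvrs' (((d0, j0) :: rest') ++ [('0', n)]) (some '0') _ ?_ hhd2 ?_ ?_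
            · exact pvValid_append_single _ '0' n hn hvrest hlaste
            · intro c' hc'
              rw [pvLast_append_single] at hc'
              exact hc'
            · rw [pvZC_append, show pvZC [('0', n)] = 1 by simp [pvZC]]
              omega
    · -- a run of ones: no shrink on either side
      have hA : pvAStep2 k (pvSigs ws, pvZC ws, pvLenF ws, best) (pvSig c (n : Int))
          = (pvSigs (ws ++ [(c, n)]), pvZC (ws ++ [(c, n)]), pvLenF (ws ++ [(c, n)]),
             max best (pvLenF (ws ++ [(c, n)]))) := by
        simp only [pvAStep2, pvSig_pos c hc]
        rw [if_neg (by omega : ¬ ((n : Int) < 0)), pvAShrink_noop k _ _ _ hzc]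
        simp [pvSigs_append, pvZC_append, pvLenF_append, pvSigs, pvZC, pvLenF, pvSig_pos c hc, hc,
          abs_of_nonneg (by omega : (0:Int) ≤ (n:Int))]
      have hB : List.foldl (pvBStep k) (pvFlat ws, pvZC ws, best, prev) (List.replicate n c)
          = (pvFlat (ws ++ [(c, n)]), pvZC (ws ++ [(c, n)]),
             max best (pvLenF (ws ++ [(c, n)])), some c) := by
        rw [pvBGrow k c n hn (pvFlat ws) (pvZC ws) best prev hzc (Or.inl hc)]
        rw [pvLenF_flat]
        simp [pvFlat_append, pvZC_append, pvLenF_append, pvFlat_cons, pvFlat_nil, pvZC, pvLenF, hc]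
      rw [hA, hB]
      refine ih hvrs' (ws ++ [(c, n)]) (some c) _ ?_ hhd2 ?_ ?_
      · exact pvValid_append_single ws c n hn hvw (fun d hd => hlastne d hd)
      · intro c' hc'
        rw [pvLast_append_single] at hc'
        exact hc' 
      · rw [pvZC_append]
        simp [pvZC, hc]
        omega

-- ===== VERDICT (by name: the statement is the Claim_ definition above) =====
theorem getMaxConsecutiveON_spec : Claim_equal_getMaxConsecutiveON := by
  intro s k _ hpre
  obtain ⟨hne, hk⟩ := hpre
  unfold Spec_getMaxConsecutiveON getMaxConsecutiveON getMaxConsecutiveON_alt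
  cases hcs : s.toList with
  | nil => exact absurd hcs hne
  | cons c cs =>
    obtain ⟨n0, rs, hruns, hn0⟩ := pvRuns_head c cs
    have hflat : pvFlat (pvRuns (c :: cs)) = c :: cs := pvFlat_runs (c :: cs)
    have hvr : pvValid (pvRuns (c :: cs)) := pvValid_runs (c :: cs)
    obtain ⟨hn0', hhd0, hvtail⟩ : 1 ≤ n0 ∧ pvHeadNe c rs ∧ pvValid rs := by
      have h := hvr
      rw [hruns] at h
      exact h
    dsimp only
    have hlst : (List.foldl pvAStep1 ([], 0, c) (c :: cs)).1
        ++ [pvSig (List.foldl pvAStep1 ([], 0, c) (c :: cs)).2.2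
             (List.foldl pvAStep1 ([], 0, c) (c :: cs)).2.1]
        = pvSigs (pvRuns (c :: cs)) := by
      conv_lhs => rw [show (c :: cs) = pvFlat (pvRuns (c :: cs)) from hflat.symm]
      rw [hruns, pvFlat_cons, List.foldl_append, pvP1_run n0 c [] 0]
      have hmain := pvP1_main rs hvtail [] (0 + (n0 : Int)) c hhd0
      have h2 : pvSigs ((c, n0) :: rs) = [] ++ [pvSig c (0 + (n0 : Int))] ++ pvSigs rs := by
        simp [pvSigs]
      exact hmain.trans h2.symm
    rw [hlst]
    conv_rhs => rw [show (c :: cs) = pvFlat (pvRuns (c :: cs)) from hflat.symm]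
    have hmain2 := pvMain k hk (pvRuns (c :: cs)) hvr [] none 0 trivial
      (by intro d m rs' h hcon; simp at hcon)
      (by intro c' h; simp [pvLast] at h)
      (by simpa [pvZC] using hk)
    exact hmain2
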